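-- pv_equiv track=rewrite | github.com/atharvarakshak/leetcode | 1264-maximum-number-of-words-you-can-type/1264-maximum-number-of-words-you-can-type.py | canBeTypedWords
-- ===== SOURCE A (Python) =====
-- def canBeTypedWords(text: str, brokenLetters: str) -> int:
--
--     res=[]
--     s=""
--     a=1
--     for c in text:
--         if(c==" " and s!="" and a==1):
--             res.append(s)
--             s=""
--         elif(c==" "):
--             a=1
--         elif(c in brokenLetters):
--             s=""
--             a=0
--         elif(a==1):
--             s+=c
--
--     if(s!=""):
--         res.append(s)
--     return len(res)
-- ===== SOURCE B (Python) =====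
-- def canBeTypedWords(text: str, brokenLetters: str) -> int:
--     broken = set(brokenLetters)
--     return sum(1 for w in text.split(' ') if w and all(c not in broken for c in w))
-- ===== Notes on version B (the rewrite author's own statement) =====
-- stated objective: simpler
-- what changed: Replaces A's single-pass character state machine (buffer s and flag a) with two phases: split the text on single spaces, then count the non-empty tokens containing no broken letter.
import Mathlib
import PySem

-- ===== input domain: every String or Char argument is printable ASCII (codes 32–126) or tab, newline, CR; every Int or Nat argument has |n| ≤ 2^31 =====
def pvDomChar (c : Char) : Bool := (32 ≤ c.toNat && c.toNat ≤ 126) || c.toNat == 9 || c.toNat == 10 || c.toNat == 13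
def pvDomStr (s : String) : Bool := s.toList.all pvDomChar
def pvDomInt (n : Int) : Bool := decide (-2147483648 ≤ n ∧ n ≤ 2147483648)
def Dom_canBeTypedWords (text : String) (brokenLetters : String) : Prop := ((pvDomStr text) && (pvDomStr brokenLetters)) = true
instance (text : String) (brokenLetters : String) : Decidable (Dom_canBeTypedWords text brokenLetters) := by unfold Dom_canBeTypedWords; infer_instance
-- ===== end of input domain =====

-- B replaces A's one-pass character state machine by split-on-space plus a per-token broken-letter test (objective: simpler).

-- ===== PORT A =====
-- words are represented as List Char; only the count of the result list is returned
def canBeTypedWordsStep (bl : List Char) (st : List (List Char) × List Char × Int) (c : Char) :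
    List (List Char) × List Char × Int :=
  if c = ' ' ∧ st.2.1 ≠ [] ∧ st.2.2 = 1 then (st.1 ++ [st.2.1], [], st.2.2)
  else if c = ' ' then (st.1, st.2.1, 1)
  else if bl.contains c then (st.1, [], 0)     -- 'c in brokenLetters' for a single char = membership
  else if st.2.2 = 1 then (st.1, st.2.1 ++ [c], st.2.2)
  else st

def canBeTypedWords (text : String) (brokenLetters : String) : Int :=
  let st := text.toList.foldl (canBeTypedWordsStep brokenLetters.toList) ([], [], 1)
  let res := if st.2.1 ≠ [] then st.1 ++ [st.2.1] else st.1
  (res.length : Int)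

-- ===== PORT B =====
def canBeTypedWords_alt (text : String) (brokenLetters : String) : Int :=
  let broken := PySem.Set.ofList brokenLetters.toList
  (((PySem.Chars.splitOn text.toList [' ']).countP
      (fun w => decide (w ≠ []) && w.all (fun c => !(broken.contains c)))) : Int)

-- ===== PRECONDITION & SPEC =====
def Spec_canBeTypedWords (text : String) (brokenLetters : String) (out : Int) : Prop := out = canBeTypedWords_alt text brokenLetters
instance (text : String) (brokenLetters : String) (out : Int) : Decidable (Spec_canBeTypedWords text brokenLetters out) := by unfold Spec_canBeTypedWords; infer_instance

-- ===== CLAIM (what is proved, stated in full; the proofs are below) =====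
def Claim_equal_canBeTypedWords : Prop := ∀ (text : String) (brokenLetters : String), Dom_canBeTypedWords text brokenLetters → Spec_canBeTypedWords text brokenLetters (canBeTypedWords text brokenLetters)

-- ===== LEMMAS AND PROOFS =====

-- the Bool token predicate used by port B
def pvP (bl : List Char) (w : List Char) : Bool :=
  decide (w ≠ []) && w.all (fun c => !((PySem.Set.ofList bl).contains c))

-- the count A's state machine produces from flag a/buffer s over the remaining characters
def pvG (bl : List Char) : Bool → List Char → List Char → Nat
  | a, s, [] => if a ∧ s ≠ [] then 1 else 0
  | a, s, c :: cs =>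
    if c = ' ' then (if a ∧ s ≠ [] then 1 else 0) + pvG bl true [] cs
    else if bl.contains c then pvG bl false [] cs
    else if a then pvG bl a (s ++ [c]) cs
    else pvG bl false [] cs

-- structural single-space split
def pvSplit : List Char → List (List Char)
  | [] => [[]]
  | c :: cs =>
    if c = ' ' then [] :: pvSplit cs
    else match pvSplit cs with
      | [] => [[c]]
      | t :: ts => (c :: t) :: ts

def pvMapFirst (f : List Char → List Char) : List (List Char) → List (List Char)
  | [] => []
  | t :: ts => f t :: ts

theorem pvSplit_ne_nil (cs : List Char) : pvSplit cs ≠ [] := by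
  cases cs with
  | nil => simp [pvSplit]
  | cons c cs =>
    simp only [pvSplit]
    split
    · simp
    · split <;> simp_all

theorem pvP_eq (bl w : List Char) :
    pvP bl w = (decide (w ≠ []) && w.all (fun c => !bl.contains c)) := by
  simp [pvP]

theorem pvSplit_exists (cs : List Char) : ∃ t ts, pvSplit cs = t :: ts := by
  cases h : pvSplit cs with
  | nil => exact absurd h (pvSplit_ne_nil cs)
  | cons t ts => exact ⟨t, ts, rfl⟩

theorem pvGoStep (fuel : Nat) (c : Char) (rest cur : List Char) (accl : List (List Char)) :
    PySem.Chars.splitOn.go [' '] (fuel+1) (c::rest) cur accl =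
      if c = ' ' then PySem.Chars.splitOn.go [' '] fuel rest [] (cur.reverse::accl)
      else PySem.Chars.splitOn.go [' '] fuel rest (c::cur) accl := by
  rw [PySem.Chars.splitOn.go]
  by_cases h : c = ' '
  · simp [List.isPrefixOf, h]
  · simp [List.isPrefixOf, h, Ne.symm h]

theorem pvGo_eq (fuel : Nat) : ∀ (l cur : List Char) (accl : List (List Char)),
    l.length ≤ fuel →
    PySem.Chars.splitOn.go [' '] fuel l cur accl =
      accl.reverse ++ pvMapFirst (cur.reverse ++ ·) (pvSplit l) := by
  induction fuel with
  | zero =>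
    intro l cur accl hl
    have hnil : l = [] := List.eq_nil_of_length_eq_zero (Nat.le_zero.mp hl)
    subst hnil
    simp [PySem.Chars.splitOn.go, pvSplit, pvMapFirst]
  | succ fuel ih =>
    intro l cur accl hl
    cases l with
    | nil => simp [PySem.Chars.splitOn.go, pvSplit, pvMapFirst]
    | cons c rest =>
      have hrest : rest.length ≤ fuel := by simp at hl; omega
      obtain ⟨t, ts, hts⟩ := pvSplit_exists rest
      rw [pvGoStep]
      by_cases hc : c = ' '
      · rw [if_pos hc, ih rest [] _ hrest]
        subst hc
        simp [pvSplit, pvMapFirst, hts]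
      · rw [if_neg hc, ih rest (c::cur) accl hrest]
        simp [pvSplit, hc, pvMapFirst, hts]

theorem pvSplitOn_eq (cs : List Char) : PySem.Chars.splitOn cs [' '] = pvSplit cs := by
  obtain ⟨t, ts, hts⟩ := pvSplit_exists cs
  show PySem.Chars.splitOn.go [' '] (cs.length + 1) cs [] [] = _
  rw [pvGo_eq (cs.length + 1) cs [] [] (by omega)]
  simp [pvMapFirst, hts]

theorem pvG_split (bl : List Char) (cs : List Char) :
    (∀ s : List Char, (' ' ∉ s) → (∀ c ∈ s, c ∉ bl) →
        pvG bl true s cs = (pvMapFirst (s ++ ·) (pvSplit cs)).countP (pvP bl)) ∧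
    pvG bl false [] cs = ((pvSplit cs).tail).countP (pvP bl) := by
  induction cs with
  | nil =>
    constructor
    · intro s hs hb
      by_cases hsn : s = []
      · simp [pvG, pvSplit, pvMapFirst, pvP_eq, hsn]
      · simp [pvG, pvSplit, pvMapFirst, pvP_eq, hsn]
        exact hb
    · simp [pvG, pvSplit]
  | cons c cs ih =>
    obtain ⟨t, ts, hts⟩ := pvSplit_exists cs
    constructor
    · intro s hs hb
      by_cases hc : c = ' '
      · subst hc
        rw [show pvG bl true s (' '::cs) = pvG bl true [] cs + (if s ≠ [] then 1 else 0) from by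
          simp [pvG, Nat.add_comm]]
        rw [ih.1 [] (by simp) (by simp)]
        by_cases hsn : s = []
        · simp [pvSplit, pvMapFirst, hts, List.countP_cons, pvP_eq, hsn]
        · simp [pvSplit, pvMapFirst, hts, List.countP_cons, pvP_eq, hsn]
          exact hb
      · by_cases hbr : c ∈ bl
        · have hcontains : bl.contains c = true := by simpa using hbr
          rw [show pvG bl true s (c :: cs) = pvG bl false [] cs from by
            simp [pvG, hc, hbr]]
          rw [ih.2, hts]
          have hpf : pvP bl (s ++ c :: t) = false := by
            simp only [pvP_eq, Bool.and_eq_false_iff]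
            right
            simp only [List.all_eq_false]
            exact ⟨c, by simp, by simpa using hbr⟩
          simp [pvSplit, pvMapFirst, hc, hts, hpf]
        · have hnc : bl.contains c = false := by simpa using hbr
          rw [show pvG bl true s (c :: cs) = pvG bl true (s ++ [c]) cs from by
            simp [pvG, hc, hbr]]
          rw [ih.1 (s ++ [c])
            (by intro h; rcases List.mem_append.mp h with h | h
                · exact hs h
                · simp at h; exact hc h.symm)
            (by intro x hx; rcases List.mem_append.mp hx with h | h
                · exact hb x h
                · simp at h; subst h; exact hbr)]
          simp [pvSplit, pvMapFirst, hc, hts, List.append_assoc]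
    · by_cases hc : c = ' '
      · subst hc
        rw [show pvG bl false [] (' ' :: cs) = pvG bl true [] cs from by simp [pvG]]
        rw [ih.1 [] (by simp) (by simp)]
        simp [pvSplit, pvMapFirst, hts]
      · by_cases hbr : c ∈ bl
        · have hcontains : bl.contains c = true := by simpa using hbr
          rw [show pvG bl false [] (c :: cs) = pvG bl false [] cs from by
            simp [pvG, hc, hbr]]
          rw [ih.2]
          simp [pvSplit, hc, hts]
        · have hnc : bl.contains c = false := by simpa using hbr
          rw [show pvG bl false [] (c :: cs) = pvG bl false [] cs from by
            simp [pvG, hc, hbr]]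
          rw [ih.2]
          simp [pvSplit, hc, hts]

theorem pvLoopA (bl : List Char) (cs : List Char) : ∀ (res : List (List Char)) (s : List Char) (a : Int),
    (a = 1 ∨ (a = 0 ∧ s = [])) →
    (let st := cs.foldl (canBeTypedWordsStep bl) (res, s, a)
     (if st.2.1 ≠ [] then st.1 ++ [st.2.1] else st.1).length) =
      res.length + pvG bl (a = 1) s cs := by
  induction cs with
  | nil =>
    intro res s a hinv
    rcases hinv with ha | ⟨ha, hs⟩
    · subst ha
      by_cases hsn : s = [] <;> simp [pvG, hsn]
    · subst ha; subst hs
      simp [pvG]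
  | cons c cs ih =>
    intro res s a hinv
    simp only [List.foldl_cons]
    by_cases h1 : (c = ' ' ∧ s ≠ [] ∧ a = 1)
    · obtain ⟨hc, hsne, ha⟩ := h1
      rw [show canBeTypedWordsStep bl (res, s, a) c = (res ++ [s], ([] : List Char), a) from by
        simp [canBeTypedWordsStep, hc, hsne, ha]]
      rw [ih (res ++ [s]) [] a (Or.inl ha)]
      subst hc; subst ha
      simp [pvG, hsne]
      omega
    · by_cases hc : c = ' '
      · have hs0 : s = [] := by
          rcases hinv with ha | ⟨ha, hs⟩
          · by_contra hne; exact h1 ⟨hc, hne, ha⟩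
          · exact hs
        rw [show canBeTypedWordsStep bl (res, s, a) c = (res, s, 1) from by
          simp only [canBeTypedWordsStep]
          rw [if_neg h1, if_pos hc]]
        rw [ih res s 1 (Or.inl rfl)]
        subst hc; subst hs0
        simp [pvG]
      · by_cases hbr : bl.contains c = true
        · have hbrM : c ∈ bl := by simpa using hbr
          rw [show canBeTypedWordsStep bl (res, s, a) c = (res, ([] : List Char), 0) from by
            simp only [canBeTypedWordsStep]
            rw [if_neg h1, if_neg hc, if_pos hbr]]
          rw [ih res [] 0 (Or.inr ⟨rfl, rfl⟩)]
          simp [pvG, hc, hbrM]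
        · have hbrm : c ∉ bl := by simpa using hbr
          by_cases ha : a = 1
          · rw [show canBeTypedWordsStep bl (res, s, a) c = (res, s ++ [c], a) from by
              simp only [canBeTypedWordsStep]
              rw [if_neg h1, if_neg hc, if_neg hbr, if_pos ha]]
            rw [ih res (s ++ [c]) a (Or.inl ha)]
            subst ha
            simp [pvG, hc, hbrm]
          · obtain ⟨ha0, hs0⟩ : a = 0 ∧ s = [] := by
              rcases hinv with h | h
              · exact absurd h ha
              · exact h
            rw [show canBeTypedWordsStep bl (res, s, a) c = (res, s, a) from by
              simp only [canBeTypedWordsStep]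
              rw [if_neg h1, if_neg hc, if_neg hbr, if_neg ha]]
            rw [ih res s a hinv]
            subst ha0; subst hs0
            simp [pvG, hc, hbrm]

-- ===== VERDICT (by name: the statement is the Claim_ definition above) =====
theorem canBeTypedWords_spec : Claim_equal_canBeTypedWords := by
  intro text brokenLetters _
  unfold Spec_canBeTypedWords canBeTypedWords canBeTypedWords_alt
  simp only [pvSplitOn_eq]
  obtain ⟨t, ts, hts⟩ := pvSplit_exists text.toList
  have h := pvLoopA brokenLetters.toList text.toList [] [] 1 (Or.inl rfl)
  simp only [List.length_nil, Nat.zero_add, decide_true] at h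
  have h2 := (pvG_split brokenLetters.toList text.toList).1 [] (by simp) (by simp)
  simp only [pvMapFirst, hts, List.nil_append] at h2
  rw [h, h2, ← hts]
  rfl
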